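-- pv_equiv track=rewrite | github.com/mustafasiraj/comment_fetcher_app | app.py | match_and_suggest
-- ===== SOURCE A (Python) =====
-- def match_and_suggest(comments, keyword_reply_dict):
--     suggestions = []
--     for comment in comments:
--         matched = False
--         for keyword, reply in keyword_reply_dict.items():
--             if keyword.lower() in comment.lower():
--                 suggestions.append((comment, reply))
--                 matched = True
--                 break  # Only first keyword match matters
--         if not matched:
--             continue
--     return suggestions
-- ===== SOURCE B (Python) =====
-- def match_and_suggest(comments, keyword_reply_dict):
--     # keyword-major staged passes: each keyword fills the still-empty slots of a
--     # per-comment reply vector; earlier keywords win, so the filled vector holds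
--     # each comment's first-matching keyword's reply.
--     lowered = [c.lower() for c in comments]
--     best = [None] * len(comments)
--     for keyword, reply in keyword_reply_dict.items():
--         kl = keyword.lower()
--         best = [b if b is not None else (reply if kl in cl else None)
--                 for cl, b in zip(lowered, best)]
--     return [(c, r) for c, r in zip(comments, best) if r is not None]
-- ===== Notes on version B (the rewrite author's own statement) =====
-- stated objective: alternative
-- what changed: B transposes the loops: instead of A's comment-major scan that breaks on the first keyword, B makes one staged pass per keyword over a per-comment reply vector of Options, filling only still-empty slots (earlier keywords win, so each comment gets its first-matching keyword's reply), then zips comments with the filled vector; every comment and keyword is lowercased exactly once instead of on each inner iteration.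
import Mathlib
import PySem

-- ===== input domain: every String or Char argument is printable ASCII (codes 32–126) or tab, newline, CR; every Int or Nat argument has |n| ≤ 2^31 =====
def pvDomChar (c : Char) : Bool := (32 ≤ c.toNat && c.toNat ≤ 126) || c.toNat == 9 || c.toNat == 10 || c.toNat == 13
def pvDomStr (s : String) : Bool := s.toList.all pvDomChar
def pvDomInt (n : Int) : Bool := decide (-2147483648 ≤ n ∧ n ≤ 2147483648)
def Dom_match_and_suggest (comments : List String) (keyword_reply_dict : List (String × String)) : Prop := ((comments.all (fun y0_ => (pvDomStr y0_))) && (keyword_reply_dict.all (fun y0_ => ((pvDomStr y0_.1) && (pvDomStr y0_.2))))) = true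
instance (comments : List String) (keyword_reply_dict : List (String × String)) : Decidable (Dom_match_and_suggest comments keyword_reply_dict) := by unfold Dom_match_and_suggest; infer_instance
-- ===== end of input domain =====

-- B transposes the loops: one staged pass per keyword fills the still-empty slots of a
-- per-comment reply vector, then comments are zipped with the vector (objective: alternative).

-- ===== PORT A =====
-- inner 'for keyword, reply in keyword_reply_dict.items(): … break' with the matched flag folded
-- into the control flow (append on first hit, then stop scanning)
def pvALoop (suggestions : List (String × String)) (comment : String) :
    List (String × String) → List (String × String)
  | [] => suggestions
  | (keyword, reply) :: rest =>
    if PySem.Str.isIn (PySem.Str.lower keyword) (PySem.Str.lower comment) then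
      suggestions ++ [(comment, reply)]
    else
      pvALoop suggestions comment rest

def match_and_suggest (comments : List String) (keyword_reply_dict : List (String × String)) : List (String × String) :=
  -- keyword_reply_dict is a Python dict: .items() iterates the deduplicated insertion order
  let items := (PySem.Dict.ofList keyword_reply_dict).items
  comments.foldl (fun suggestions comment => pvALoop suggestions comment items) []

-- ===== PORT B =====
-- best = [b if b is not None else (reply if kl in cl else None) for cl, b in zip(lowered, best)]
def pvBStep (kl reply : String) (lowered : List String) (best : List (Option String)) :
    List (Option String) :=
  List.zipWith (fun cl b =>
    match b with
    | some r => some r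
    | none => if PySem.Str.isIn kl cl then some reply else none) lowered best

def match_and_suggest_alt (comments : List String) (keyword_reply_dict : List (String × String)) : List (String × String) :=
  let lowered := comments.map PySem.Str.lower
  let best0 : List (Option String) := List.replicate comments.length none
  let best := (PySem.Dict.ofList keyword_reply_dict).items.foldl
    (fun best p => pvBStep (PySem.Str.lower p.1) p.2 lowered best) best0
  (comments.zip best).filterMap (fun cb => cb.2.map (fun r => (cb.1, r)))

-- ===== PRECONDITION & SPEC =====
def Spec_match_and_suggest (comments : List String) (keyword_reply_dict : List (String × String)) (out : List (String × String)) : Prop := out = match_and_suggest_alt comments keyword_reply_dict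
instance (comments : List String) (keyword_reply_dict : List (String × String)) (out : List (String × String)) : Decidable (Spec_match_and_suggest comments keyword_reply_dict out) := by unfold Spec_match_and_suggest; infer_instance

-- ===== CLAIM (what is proved, stated in full; the proofs are below) =====
def Claim_equal_match_and_suggest : Prop := ∀ (comments : List String) (keyword_reply_dict : List (String × String)), Dom_match_and_suggest comments keyword_reply_dict → Spec_match_and_suggest comments keyword_reply_dict (match_and_suggest comments keyword_reply_dict)

-- ===== LEMMAS AND PROOFS =====

-- the first matching keyword's reply for one (already lowered) comment
def pvFirst (cl : String) (items : List (String × String)) : Option String :=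
  items.findSome? (fun p =>
    if PySem.Str.isIn (PySem.Str.lower p.1) cl then some p.2 else none)

-- A's inner loop = accumulator ++ the first-match result
theorem pvALoop_eq (comment : String) (items : List (String × String)) :
    ∀ (suggestions : List (String × String)),
      pvALoop suggestions comment items =
        suggestions ++ ((pvFirst (PySem.Str.lower comment) items).map
          (fun r => (comment, r))).toList := by
  induction items with
  | nil => intro s; simp [pvALoop, pvFirst]
  | cons p rest ih =>
    intro s
    obtain ⟨k, r⟩ := p
    simp only [pvALoop, pvFirst, List.findSome?_cons]
    cases h : PySem.Str.isIn (PySem.Str.lower k) (PySem.Str.lower comment) with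
    | true => simp only [if_pos, Option.map_some, Option.toList_some]
    | false =>
      simp only [Bool.false_eq_true, if_false, ih s, pvFirst]

-- A's outer accumulator fold = filterMap of first matches
theorem pvAFold_eq (items : List (String × String)) :
    ∀ (comments : List String) (acc : List (String × String)),
      comments.foldl (fun suggestions comment => pvALoop suggestions comment items) acc =
        acc ++ comments.filterMap (fun c =>
          (pvFirst (PySem.Str.lower c) items).map (fun r => (c, r))) := by
  intro comments
  induction comments with
  | nil => intro acc; simp
  | cons c cs ih =>
    intro acc
    simp only [List.foldl_cons, List.filterMap_cons]
    rw [pvALoop_eq, ih]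
    cases hr : (pvFirst (PySem.Str.lower c) items).map (fun r => (c, r)) with
    | none => simp
    | some v => simp

-- a filled slot is never overwritten
theorem pvCellFold_some (items : List (String × String)) (cl : String) (r : String) :
    items.foldl (fun b p =>
      match b with
      | some r => some r
      | none => if PySem.Str.isIn (PySem.Str.lower p.1) cl then some p.2 else none)
      (some r) = some r := by
  induction items with
  | nil => rfl
  | cons p rest ih => simpa using ih

-- folding one cell from empty = the first-match result
theorem pvCellFold_eq (cl : String) (items : List (String × String)) :
    items.foldl (fun b p =>
      match b with
      | some r => some r
      | none => if PySem.Str.isIn (PySem.Str.lower p.1) cl then some p.2 else none)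
      none = pvFirst cl items := by
  induction items with
  | nil => rfl
  | cons p rest ih =>
    simp only [List.foldl_cons, pvFirst, List.findSome?_cons]
    cases h : PySem.Str.isIn (PySem.Str.lower p.1) cl with
    | true => simp only [if_pos, pvCellFold_some]
    | false => simp only [Bool.false_eq_true, if_false, ih, pvFirst]

-- the keyword-major fold acts pointwise on each (comment, slot) cell
theorem pvBFold_cons (items : List (String × String)) (cl : String) (cls : List String) :
    ∀ (b : Option String) (bs : List (Option String)),
      items.foldl (fun best p => pvBStep (PySem.Str.lower p.1) p.2 (cl :: cls) best) (b :: bs) =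
        (items.foldl (fun x p =>
          match x with
          | some r => some r
          | none => if PySem.Str.isIn (PySem.Str.lower p.1) cl then some p.2 else none) b)
        :: items.foldl (fun best p => pvBStep (PySem.Str.lower p.1) p.2 cls best) bs := by
  induction items with
  | nil => intro b bs; rfl
  | cons p rest ih =>
    intro b bs
    simp only [List.foldl_cons, pvBStep, List.zipWith_cons_cons]
    exact ih _ _

-- the filled vector = per-comment first matches
theorem pvBest_eq (items : List (String × String)) :
    ∀ (comments : List String),
      items.foldl (fun best p => pvBStep (PySem.Str.lower p.1) p.2 (comments.map PySem.Str.lower) best)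
        (List.replicate comments.length none) =
        comments.map (fun c => pvFirst (PySem.Str.lower c) items) := by
  intro comments
  induction comments with
  | nil =>
    simp only [List.length_nil, List.replicate, List.map_nil]
    induction items with
    | nil => rfl
    | cons p rest ih => simpa [pvBStep] using ih
  | cons c cs ih =>
    simp only [List.map_cons, List.length_cons, List.replicate_succ]
    rw [pvBFold_cons, ih, pvCellFold_eq]

-- zipping a list with its map and filterMapping = direct filterMap
theorem pvZipMap_filterMap (comments : List String) (f : String → Option String) :
    (comments.zip (comments.map f)).filterMap (fun cb => cb.2.map (fun r => (cb.1, r))) =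
      comments.filterMap (fun c => (f c).map (fun r => (c, r))) := by
  induction comments with
  | nil => rfl
  | cons c cs ih =>
    simp only [List.map_cons, List.zip_cons_cons, List.filterMap_cons]
    cases h : (f c).map (fun r => (c, r)) with
    | none => simpa [h] using ih
    | some v => simpa [h] using ih

-- ===== VERDICT (by name: the statement is the Claim_ definition above) =====
theorem match_and_suggest_spec : Claim_equal_match_and_suggest := by
  intro comments keyword_reply_dict _
  unfold Spec_match_and_suggest match_and_suggest match_and_suggest_alt
  simp only [pvAFold_eq, pvBest_eq, pvZipMap_filterMap, List.nil_append]
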